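-- pv_equiv track=rewrite | github.com/YoungRaeKimm/algorithm | pr_kakao_shuttleBus.py | solution
-- ===== SOURCE A (Python) =====
-- from collections import deque
--
-- def convert_time(t):
--     tmp = ''
--     if int(t/60) <10:
--         tmp += '0' + str(int(t/60)) + ':'
--     else:
--         tmp += str(int(t/60)) + ':'
--     t %= 60
--     if t < 10:
--         tmp += '0' + str(t)
--     else:
--         tmp += str(t)
--     return tmp
--
-- def solution(n, t, m, timetable):
--     q = []
--     for i in range(len(timetable)):
--         q.append(int(timetable[i].split(':')[0]) * 60 + int(timetable[i].split(':')[1]))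
--     q = deque(sorted(q))
--
--     time = 9*60
--     last_crew = 0
--     for i in range(n):
--         cnt = 0
--
--         while len(q) > 0:
--             if cnt >= m or q[0] > time:
--                 break
--             if q[0] <= time:
--                 cnt += 1
--                 last_crew = q[0]
--                 q.popleft()
--
--         if i == n-1:
--             if cnt == m:
--                 return convert_time(last_crew - 1)
--             else :
--                 return convert_time(time)
--
--         time += t
-- ===== SOURCE B (Python) =====
-- def convert_time(t):
--     tmp = ''
--     if int(t/60) < 10:
--         tmp += '0' + str(int(t/60)) + ':'
--     else:
--         tmp += str(int(t/60)) + ':'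
--     t %= 60
--     if t < 10:
--         tmp += '0' + str(t)
--     else:
--         tmp += str(t)
--     return tmp
--
-- def bisect_right(d, x):
--     # hand-written standard binary search (no imports beyond what A uses)
--     lo, hi = 0, len(d)
--     while lo < hi:
--         mid = (lo + hi) // 2
--         if d[mid] <= x:
--             lo = mid + 1
--         else:
--             hi = mid
--     return lo
--
-- def to_minutes(s):
--     parts = s.split(':')
--     return int(parts[0]) * 60 + int(parts[1])
--
-- def solution(n, t, m, timetable):
--     d = sorted(to_minutes(s) for s in timetable)
--     j = 0
--     time = 9 * 60
--     for _ in range(n - 1):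
--         j += min(m, max(0, bisect_right(d, time) - j))
--         time += t
--     cnt = min(m, max(0, bisect_right(d, time) - j))
--     if cnt == m:
--         return convert_time(d[j + m - 1] - 1)
--     return convert_time(time)
-- ===== Notes on version B (the rewrite author's own statement) =====
-- stated objective: alternative
-- what changed: Replaces A's deque simulation that pops crews one by one inside a nested while loop with a sorted array walked by an index pointer: each bus advances the pointer by min(m, bisect_right(d, time) - j) via binary search, and the answer is read off in closed form from d[j+m-1] or the last bus time.
-- outside the precondition, e.g. on solution(1, 0, 0, ['02:30']): A returns '00:59', B returns '02:29'; on solution(1, 0, 0, []): A returns '00:59', B raises IndexError; on solution(0, 0, 1, []): A returns None, B returns '09:00'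
import Mathlib
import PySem

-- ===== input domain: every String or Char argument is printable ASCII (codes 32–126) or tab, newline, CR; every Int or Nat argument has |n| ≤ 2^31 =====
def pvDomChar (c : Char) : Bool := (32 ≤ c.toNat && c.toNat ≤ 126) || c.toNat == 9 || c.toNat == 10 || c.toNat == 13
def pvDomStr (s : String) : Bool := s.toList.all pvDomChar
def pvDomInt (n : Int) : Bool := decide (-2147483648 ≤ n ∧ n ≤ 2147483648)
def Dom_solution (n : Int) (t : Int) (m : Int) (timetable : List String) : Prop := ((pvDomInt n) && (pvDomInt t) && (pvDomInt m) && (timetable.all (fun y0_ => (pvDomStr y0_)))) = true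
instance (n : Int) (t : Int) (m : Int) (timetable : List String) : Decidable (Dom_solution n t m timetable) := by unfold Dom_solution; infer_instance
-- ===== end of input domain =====

-- B replaces A's per-crew deque simulation by a sorted list walked with an index pointer
-- and a binary search (bisect_right) per bus; same return value on Pre_, objective: alternative.

-- ===== PORT A =====

-- shared helper: Python convert_time(t).  int(t/60) is CPython float division then truncation;
-- PySem.Int.truncdiv is exact for |t| < 2^53, which Pre_ guarantees.  String building is done
-- on List Char (exact; Lean's own String.append is kernel-opaque).
def convert_time (t : Int) : String :=
  let h := PySem.Int.truncdiv t 60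
  let tmp : List Char :=
    if h < 10 then '0' :: (PySem.Int.toChars h ++ [':']) else PySem.Int.toChars h ++ [':']
  let r := PySem.Int.mod t 60
  String.ofList (tmp ++ (if r < 10 then '0' :: PySem.Int.toChars r else PySem.Int.toChars r))

-- A's inner while loop.  The Python body's second test `q[0] <= time` is exactly the negation
-- of the break test already passed, so the pop is unconditional here.
def whileA (m time : Int) : List Int → Int → Int → List Int × Int × Int
  | [], cnt, last => ([], cnt, last)
  | x :: rest, cnt, last =>
    if cnt ≥ m ∨ x > time then (x :: rest, cnt, last)
    else whileA m time rest (cnt + 1) x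

-- A's `for i in range(n)` with the early returns at i == n-1; fuel = n.toNat.
-- Fuel 0 (n ≤ 0): the Python falls off the loop and returns None — excluded by Pre_.
def busA (t m : Int) : Nat → List Int → Int → Int → String
  | 0, _, _, _ => ""
  | k + 1, q, time, last =>
    let r := whileA m time q 0 last
    if k = 0 then
      if r.2.1 = m then convert_time (r.2.2 - 1) else convert_time time
    else busA t m k r.1 (time + t) r.2.2

-- int(s.split(':')[0])*60 + int(s.split(':')[1]); split? with sep ":" is always some.
def solution (n : Int) (t : Int) (m : Int) (timetable : List String) : String :=
  let q := List.foldl (fun q s => q ++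
      [((PySem.List.pyGet? ((PySem.Str.split? s ":").getD []) 0).bind PySem.Int.ofStr?).getD 0 * 60 +
       ((PySem.List.pyGet? ((PySem.Str.split? s ":").getD []) 1).bind PySem.Int.ofStr?).getD 0]) [] timetable
  let d := PySem.List.sorted q (fun x => x)
  busA t m n.toNat d 540 0

-- ===== PORT B =====

-- Source B's to_minutes(s): split once, int both parts.
def toMinutes (s : String) : Int :=
  let parts := (PySem.Str.split? s ":").getD []
  ((PySem.List.pyGet? parts 0).bind PySem.Int.ofStr?).getD 0 * 60 +
  ((PySem.List.pyGet? parts 1).bind PySem.Int.ofStr?).getD 0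

-- Source B's hand-written bisect_right(d, x) is the standard lo/hi binary-search loop;
-- PySem.List.bisectRight is that same loop.

-- Source B's `for _ in range(n-1)` pointer walk: j += min(m, max(0, bisect_right(d, time) - j)).
def loopB (t m : Int) (d : List Int) : Nat → Int → Int → Int × Int
  | 0, j, time => (j, time)
  | k + 1, j, time =>
    loopB t m d k (j + min m (max 0 ((PySem.List.bisectRight d time : Int) - j))) (time + t)

def solution_alt (n : Int) (t : Int) (m : Int) (timetable : List String) : String :=
  let d := PySem.List.sorted (timetable.map toMinutes) (fun x => x)
  let p := loopB t m d (n - 1).toNat 0 540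
  let cnt := min m (max 0 ((PySem.List.bisectRight d p.2 : Int) - p.1))
  if cnt = m then convert_time ((PySem.List.pyGet? d (p.1 + m - 1)).getD 0 - 1)
  else convert_time p.2

-- ===== PRECONDITION & SPEC =====

-- one timetable entry parses (s.split(':') has ≥ 2 parts, both int()-able — otherwise A raises
-- IndexError/ValueError) and its minute value is small enough for CPython's float `int(t/60)`
-- to be integer-exact (|v| ≤ 2^52; beyond that A's float truncation is not portable).
def entryOk (s : String) : Prop :=
  let parts := (PySem.Str.split? s ":").getD []
  2 ≤ parts.length ∧
  (PySem.Int.ofStr? (parts.getD 0 "")).isSome ∧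
  (PySem.Int.ofStr? (parts.getD 1 "")).isSome ∧
  ((PySem.Int.ofStr? (parts.getD 0 "")).getD 0 * 60 +
   (PySem.Int.ofStr? (parts.getD 1 "")).getD 0).natAbs ≤ 2 ^ 52

-- Pre_ excludes: n ≤ 0 (A returns None, not a str); m ≤ 0 (zero/negative bus capacity: A's
-- answer comes from the leftover sentinel last_crew = 0, a defensible-corner artefact, and B's
-- natural formula indexes d[j+m-1] there); unparseable entries (A raises); and minute values or
-- a last-bus time beyond 2^52, where CPython computes convert_time via float division and the
-- truncation is not integer-exact (not portable).
def Pre_solution (n : Int) (t : Int) (m : Int) (timetable : List String) : Prop :=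
  1 ≤ n ∧ 1 ≤ m ∧ (540 + (n - 1) * t).natAbs ≤ 2 ^ 52 ∧ ∀ s ∈ timetable, entryOk s
instance (n : Int) (t : Int) (m : Int) (timetable : List String) : Decidable (Pre_solution n t m timetable) := by unfold Pre_solution entryOk; infer_instance

def pvWitness_solution : Int × Int × Int × List String := (1, 1, 1, ["08:00"])

def Spec_solution (n : Int) (t : Int) (m : Int) (timetable : List String) (out : String) : Prop := out = solution_alt n t m timetable
instance (n : Int) (t : Int) (m : Int) (timetable : List String) (out : String) : Decidable (Spec_solution n t m timetable out) := by unfold Spec_solution; infer_instance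

-- ===== CLAIM (what is proved, stated in full; the proofs are below) =====
def Claim_equal_solution : Prop := ∀ (n : Int) (t : Int) (m : Int) (timetable : List String), Dom_solution n t m timetable → Pre_solution n t m timetable → Spec_solution n t m timetable (solution n t m timetable)

-- ===== LEMMAS AND PROOFS =====

-- number of list elements ≤ x in a leading run: length of takeWhile (· ≤ x)
def twl (d : List Int) (x : Int) : Nat := (d.takeWhile (fun y => decide (y ≤ x))).length

lemma twl_cons_pos {y x : Int} (h : y ≤ x) (rest : List Int) :
    twl (y :: rest) x = twl rest x + 1 := by
  simp [twl, h]

lemma twl_cons_neg {y x : Int} (h : ¬ y ≤ x) (rest : List Int) :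
    twl (y :: rest) x = 0 := by
  simp [twl, h]

lemma twl_le_length (d : List Int) (x : Int) : twl d x ≤ d.length :=
  (List.takeWhile_sublist _).length_le

lemma twl_eq_zero_of_forall_gt {d : List Int} {x : Int} (h : ∀ y ∈ d, x < y) :
    twl d x = 0 := by
  cases d with
  | nil => rfl
  | cons y rest => exact twl_cons_neg (by have := h y (by simp); omega) rest

lemma twl_lt_imp_le {d : List Int} {x : Int} :
    ∀ (j : Nat) (hj : j < d.length), j < twl d x → d[j] ≤ x := by
  induction d with
  | nil => simp [twl]
  | cons y rest ih =>
    intro j hj hlt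
    by_cases hy : y ≤ x
    · cases j with
      | zero => simpa using hy
      | succ j' =>
        rw [twl_cons_pos hy] at hlt
        simpa using ih j' (by simpa using hj) (by omega)
    · rw [twl_cons_neg hy] at hlt; omega

lemma twl_le_imp_gt {d : List Int} {x : Int} (hs : d.Pairwise (fun a b => a ≤ b)) :
    ∀ (j : Nat) (hj : j < d.length), twl d x ≤ j → x < d[j] := by
  induction d with
  | nil => simp
  | cons y rest ih =>
    intro j hj hle
    rcases List.pairwise_cons.mp hs with ⟨hall, hrest⟩
    by_cases hy : y ≤ x
    · rw [twl_cons_pos hy] at hle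
      cases j with
      | zero => omega
      | succ j' => simpa using ih hrest j' (by simpa using hj) (by omega)
    · cases j with
      | zero => simpa using by omega
      | succ j' =>
        have hj' : j' < rest.length := by simpa using hj
        have : y ≤ rest[j'] := hall _ (List.getElem_mem hj')
        simpa using by omega

lemma br_eq_twl {d : List Int} (hs : d.Pairwise (fun a b => a ≤ b)) (x : Int) :
    PySem.List.bisectRight d x = twl d x := by
  obtain ⟨hle, h1, h2⟩ := PySem.List.bisectRight_spec d x hs
  rcases Nat.lt_trichotomy (PySem.List.bisectRight d x) (twl d x) with h | h | h
  · have hj : PySem.List.bisectRight d x < d.length := lt_of_lt_of_le h (twl_le_length d x)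
    have := twl_lt_imp_le _ hj h
    have := h2 _ hj (le_refl _)
    omega
  · exact h
  · have hj : twl d x < d.length := lt_of_lt_of_le h hle
    have := twl_le_imp_gt hs _ hj (le_refl _)
    have := h1 _ hj h
    omega

lemma twl_drop {d : List Int} (hs : d.Pairwise (fun a b => a ≤ b)) (x : Int) :
    ∀ j : Nat, twl (d.drop j) x = twl d x - j := by
  induction d with
  | nil => intro j; simp [twl]
  | cons y rest ih =>
    intro j
    rcases List.pairwise_cons.mp hs with ⟨hall, hrest⟩
    cases j with
    | zero => simp
    | succ j' =>
      rw [List.drop_succ_cons, ih hrest j']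
      by_cases hy : y ≤ x
      · rw [twl_cons_pos hy]; omega
      · rw [twl_cons_neg hy]
        have h0 : twl rest x = 0 :=
          twl_eq_zero_of_forall_gt (fun z hz => by have := hall z hz; omega)
        omega

lemma whileA_eq (m time : Int) : ∀ (q : List Int) (cnt last : Int),
    whileA m time q cnt last =
      (q.drop (min (m - cnt).toNat (twl q time)),
       cnt + (min (m - cnt).toNat (twl q time) : Int),
       (q.take (min (m - cnt).toNat (twl q time))).getLastD last) := by
  intro q
  induction q with
  | nil => intro cnt last; simp [whileA, twl]
  | cons x rest ih =>
    intro cnt last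
    rw [whileA]
    by_cases hb : cnt ≥ m ∨ x > time
    · rw [if_pos hb]
      have hk : min (m - cnt).toNat (twl (x :: rest) time) = 0 := by
        rcases hb with h | h
        · omega
        · rw [twl_cons_neg (by omega)]; omega
      rw [hk]
      simp
      omega
    · rw [if_neg hb]
      rw [not_or] at hb
      obtain ⟨hb1, hb2⟩ := hb
      have h1 : cnt < m := by omega
      have h2 : x ≤ time := by omega
      clear hb1 hb2
      rw [twl_cons_pos h2]
      have hk : min (m - cnt).toNat (twl rest time + 1)
          = min (m - (cnt + 1)).toNat (twl rest time) + 1 := by omega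
      rw [hk, ih, List.drop_succ_cons, List.take_succ_cons, List.getLastD_cons]
      simp only [Prod.mk.injEq]
      refine ⟨?_, ?_, ?_⟩ <;> first | trivial | omega

lemma getLastD_take (l : List Int) : ∀ (k : Nat) (a : Int), 1 ≤ k → k ≤ l.length →
    (l.take k).getLastD a = l.getD (k - 1) 0 := by
  induction l with
  | nil => intro k a h1 h2; simp at h2; omega
  | cons x rest ih =>
    intro k a h1 h2
    cases k with
    | zero => omega
    | succ k' =>
      rw [List.take_succ_cons, List.getLastD_cons]
      cases Nat.eq_zero_or_pos k' with
      | inl h0 => subst h0; simp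
      | inr hpos =>
        rw [ih k' x hpos (by simpa using h2)]
        have : k' + 1 - 1 = (k' - 1) + 1 := by omega
        simp [this]

lemma busA_eq_loopB {d : List Int} (hs : d.Pairwise (fun a b => a ≤ b)) {t m : Int}
    (hm : 1 ≤ m) : ∀ (k : Nat) (j : Nat) (time last : Int),
    busA t m (k + 1) (d.drop j) time last =
      (let p := loopB t m d k (j : Int) time
       let cnt := min m (max 0 ((PySem.List.bisectRight d p.2 : Int) - p.1))
       if cnt = m then convert_time ((PySem.List.pyGet? d (p.1 + m - 1)).getD 0 - 1)
       else convert_time p.2) := by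
  intro k
  induction k with
  | zero =>
    intro j time last
    rw [busA]
    simp only [loopB, whileA_eq, zero_add, if_true]
    set K := min (m - 0).toNat (twl (List.drop j d) time) with hK
    have htd : twl (List.drop j d) time = twl d time - j := twl_drop hs time j
    have hbr : PySem.List.bisectRight d time = twl d time := br_eq_twl hs time
    have htl : twl d time ≤ d.length := twl_le_length d time
    rw [hbr]
    split_ifs with h1 h2 h3
    · -- both full
      have hKm : K = m.toNat := by rw [hK]; omega
      have hge : j + m.toNat ≤ twl d time := by rw [hK] at hKm; omega
      congr 1
      have hlast : ((List.drop j d).take K).getLastD last = (List.drop j d).getD (K - 1) 0 := by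
        apply getLastD_take
        · omega
        · rw [List.length_drop]; omega
      rw [hlast]
      have hidx : (List.drop j d).getD (K - 1) 0 = d.getD (j + (K - 1)) 0 := by
        simp [List.getD_eq_getElem?_getD, List.getElem?_drop]
      rw [hidx]
      have hcast : (j : Int) + m - 1 = ((j + (K - 1) : Nat) : Int) := by omega
      rw [hcast, PySem.List.pyGet?_natCast, List.getD_eq_getElem?_getD]
    · exact absurd h1 (by omega)
    · exact absurd h3 (by omega)
    · rfl
  | succ k ih =>
    intro j time last
    rw [busA]
    simp only [whileA_eq, zero_add, Nat.succ_ne_zero, if_false]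
    set K := min (m - 0).toNat (twl (List.drop j d) time) with hK
    have htd : twl (List.drop j d) time = twl d time - j := twl_drop hs time j
    have hbr : PySem.List.bisectRight d time = twl d time := br_eq_twl hs time
    rw [List.drop_drop, ih (j + K) (time + t) _]
    have harg : (j : Int) + min m (max 0 ((PySem.List.bisectRight d time : Int) - (j : Int)))
        = ((j + K : Nat) : Int) := by rw [hbr, hK]; omega
    conv_rhs => rw [loopB]
    rw [harg]

-- ===== VERDICT (by name: the statement is the Claim_ definition above) =====
theorem solution_spec : Claim_equal_solution := by
  intro n t m timetable _hdom hpre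
  obtain ⟨hn, hm, -, -⟩ := hpre
  unfold Spec_solution solution solution_alt
  rw [PySem.List.foldl_append_singleton_eq_map]
  have hmap : timetable.map (fun s =>
      ((PySem.List.pyGet? ((PySem.Str.split? s ":").getD []) 0).bind PySem.Int.ofStr?).getD 0 * 60 +
      ((PySem.List.pyGet? ((PySem.Str.split? s ":").getD []) 1).bind PySem.Int.ofStr?).getD 0)
      = timetable.map toMinutes := rfl
  simp only [List.nil_append, hmap]
  have hfuel : n.toNat = (n - 1).toNat + 1 := by omega
  rw [hfuel]
  have hsorted := PySem.List.sorted_pairwise (timetable.map toMinutes) (fun x => x)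
  have h := busA_eq_loopB hsorted (t := t) hm ((n - 1).toNat) 0 540 0
  simp only [List.drop_zero, Nat.cast_zero] at h
  exact h
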